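-- pv_equiv track=rewrite | github.com/Quick-One/CC | CF_Quick-One/885_div2/C.py | process
-- ===== SOURCE A (Python) =====
-- def process(a,b):
--     moves = 1
--
--     while a != 0 and b != 0:
--         invert = False
--         if a > b:
--             a,b = b,a
--             invert = True
--
--         k = b//a
--
--         # Case 1 k >= 2
--         if k >= 2:
--             d,r = divmod(b, 2*a)
--             moves += 3 * d
--             a,b = a,r
--
--             if invert:
--                 a,b = b,a
--
--         # Case 2 k == 1
--         else:
--             if invert:
--                 a, b = b, a
--             moves += 1
--             a,b = b, abs(a-b)
--
--     if a != 0: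
--         moves += 1
--
--     return moves % 3
-- ===== SOURCE B (Python) =====
-- def rec(a, b):
--     # number of moves contributed by pair (a, b), terminal adjustment included
--     if a == 0:
--         return 0
--     if b == 0:
--         return 1
--     lo, hi = (a, b) if a <= b else (b, a)
--     if lo > 0 and hi >= 2 * lo:
--         d, r = divmod(hi, 2 * lo)
--         return 3 * d + (rec(lo, r) if a <= b else rec(r, lo))
--     return 1 + rec(b, abs(a - b))
--
-- def process(a, b):
--     return (1 + rec(a, b)) % 3
-- ===== Notes on version B (the rewrite author's own statement) =====
-- stated objective: simpler
-- what changed: The imperative while-loop with an accumulator, an invert flag and a trailing adjustment is replaced by a non-tail recursive helper rec(a,b) that returns the move count directly, with the initial move and the final mod-3 folded into a one-line wrapper and the terminal +1 folded into the base cases.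
import Mathlib
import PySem

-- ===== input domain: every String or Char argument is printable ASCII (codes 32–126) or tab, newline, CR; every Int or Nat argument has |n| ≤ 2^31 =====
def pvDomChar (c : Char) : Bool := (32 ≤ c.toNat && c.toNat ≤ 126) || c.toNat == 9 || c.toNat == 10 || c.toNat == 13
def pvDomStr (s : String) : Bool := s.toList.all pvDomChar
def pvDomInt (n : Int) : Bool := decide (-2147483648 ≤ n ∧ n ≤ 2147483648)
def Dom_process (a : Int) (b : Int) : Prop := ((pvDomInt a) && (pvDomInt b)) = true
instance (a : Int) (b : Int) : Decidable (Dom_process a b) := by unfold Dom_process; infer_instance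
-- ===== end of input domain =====

-- B replaces A's while loop with its moves accumulator, invert flag and trailing
-- +1 adjustment by a recursive helper that returns the move count directly (simpler
-- decomposition, same cost).

-- Sign-pattern phase of (a, b); both ports' loops leave non-negative phases within
-- one step per phase, so it heads the lexicographic termination measure.
def pvPhase (a b : Int) : Nat :=
  if a < 0 then (if b < 0 then 3 else 1) else (if b < 0 then 2 else 0)

-- Python's `b // a >= 2` test, rephrased linearly; cited by both termination proofs
-- and by the equivalence proof to align A's branch test with B's.
theorem pv_fdiv_ge_two_iff (a b : Int) (ha : a ≠ 0) (hab : a ≤ b) :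
    2 ≤ PySem.Int.floordiv b a ↔ 0 < a ∧ 2 * a ≤ b := by
  rcases lt_or_gt_of_ne ha with hneg | hpos
  · have h1 := PySem.Int.mod_neg_bounds b hneg
    have h2 := PySem.Int.floordiv_mul_add_mod b a
    constructor
    · intro hq
      exfalso
      have h3 : PySem.Int.floordiv b a * a ≤ 2 * a :=
        mul_le_mul_of_nonpos_right hq (le_of_lt hneg)
      omega
    · intro hc; omega
  · rw [PySem.Int.le_floordiv_iff_mul_le hpos]
    exact ⟨fun hc => ⟨hpos, hc⟩, fun hc => hc.2⟩

-- The lexicographic-decrease facts for the shared termination measure of both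
-- ports' recursion (cited by name in each decreasing_by).
theorem pvPhase_nonneg (a b : Int) (ha : 0 ≤ a) (hb : 0 ≤ b) : pvPhase a b = 0 := by
  unfold pvPhase
  rw [if_neg (by omega), if_neg (by omega)]

theorem pvPhase_step (a b c : Int) (ha : a ≠ 0) (hb : b ≠ 0)
    (hne : ¬ (0 < a ∧ 0 < b)) (hc : 0 ≤ c) : pvPhase b c < pvPhase a b := by
  unfold pvPhase
  split_ifs <;> omega

theorem pv_lex_A (a b x : Int) (hb : 0 < b) (h2 : 2 * b ≤ a) (hx1 : 0 ≤ x) (hx2 : x < 2 * b) :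
    Prod.Lex (· < ·) (· < ·) (pvPhase x b, (x + b).toNat) (pvPhase a b, (a + b).toNat) := by
  refine Prod.lex_iff.mpr (Or.inr ⟨?_, ?_⟩)
  · dsimp only
    rw [pvPhase_nonneg x b hx1 (by omega), pvPhase_nonneg a b (by omega) (by omega)]
  · exact (Int.toNat_lt_toNat (by omega)).mpr (by omega)

theorem pv_lex_B (a b x : Int) (ha : 0 < a) (h2 : 2 * a ≤ b) (hx1 : 0 ≤ x) (hx2 : x < 2 * a) :
    Prod.Lex (· < ·) (· < ·) (pvPhase a x, (a + x).toNat) (pvPhase a b, (a + b).toNat) := by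
  refine Prod.lex_iff.mpr (Or.inr ⟨?_, ?_⟩)
  · dsimp only
    rw [pvPhase_nonneg a x (by omega) hx1, pvPhase_nonneg a b (by omega) (by omega)]
  · exact (Int.toNat_lt_toNat (by omega)).mpr (by omega)

theorem pv_lex_C (a b : Int) (ha : a ≠ 0) (hb : b ≠ 0)
    (h : 0 < a ∧ 0 < b → a < 2 * b ∧ b < 2 * a) :
    Prod.Lex (· < ·) (· < ·) (pvPhase b |a - b|, (b + |a - b|).toNat) (pvPhase a b, (a + b).toNat) := by
  by_cases hpos : 0 < a ∧ 0 < b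
  · obtain ⟨h1, h2⟩ := h hpos
    refine Prod.lex_iff.mpr (Or.inr ⟨?_, ?_⟩)
    · dsimp only
      rw [pvPhase_nonneg b _ (by omega) (abs_nonneg _), pvPhase_nonneg a b (by omega) (by omega)]
    · rcases abs_cases (a - b) with ⟨he, hs⟩ | ⟨he, hs⟩ <;>
        exact (Int.toNat_lt_toNat (by omega)).mpr (by omega)
  · exact Prod.lex_iff.mpr (Or.inl (pvPhase_step a b |a - b| ha hb hpos (abs_nonneg _)))

-- ===== PORT A =====
-- A's while loop, returning the final (a, moves).  In the k ≥ 2 branch the pair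
-- becomes (a1, r), swapped back when invert; in the k ≤ 1 branch the swap-back
-- restores exactly the original (a, b), so the new pair is (b, |a - b|).
def loopW (a b moves : Int) : Int × Int :=
  if h : a ≠ 0 ∧ b ≠ 0 then
    let invert := a > b
    let a1 := if a > b then b else a
    let b1 := if a > b then a else b
    if hk : 2 ≤ PySem.Int.floordiv b1 a1 then
      let d := PySem.Int.floordiv b1 (2 * a1)
      let r := PySem.Int.mod b1 (2 * a1)
      if invert then loopW r a1 (moves + 3 * d) else loopW a1 r (moves + 3 * d)
    else
      loopW b (|a - b|) (moves + 1)
  else (a, moves)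
termination_by (pvPhase a b, (a + b).toNat)
decreasing_by
  · -- k ≥ 2, invert (a > b): recurse on (r, b)
    rename_i hinv
    have hinv : a > b := hinv
    simp only [a1, b1, dif_pos hinv] at hk ⊢
    have hf := (pv_fdiv_ge_two_iff b a h.2 (le_of_lt hinv)).1 hk
    exact pv_lex_A a b _ hf.1 hf.2 (PySem.Int.mod_nonneg _ (by omega)) (PySem.Int.mod_lt _ (by omega))
  · -- k ≥ 2, no invert (a ≤ b): recurse on (a, r)
    rename_i hinv
    have hnb : ¬ a > b := hinv
    simp only [a1, b1, dif_neg hnb] at hk ⊢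
    have hf := (pv_fdiv_ge_two_iff a b h.1 (not_lt.mp hnb)).1 hk
    exact pv_lex_B a b _ hf.1 hf.2 (PySem.Int.mod_nonneg _ (by omega)) (PySem.Int.mod_lt _ (by omega))
  · -- k ≤ 1: recurse on (b, |a - b|)
    refine pv_lex_C a b h.1 h.2 (fun hp => ?_)
    by_cases hab : a > b
    · simp only [a1, b1, dif_pos hab] at hk
      rcases not_and_or.mp (fun hc => hk ((pv_fdiv_ge_two_iff b a h.2 (le_of_lt hab)).2 hc))
        with h1 | h1
      · exact absurd hp.2 h1
      · exact ⟨by omega, by omega⟩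
    · simp only [a1, b1, dif_neg hab] at hk
      rcases not_and_or.mp (fun hc => hk ((pv_fdiv_ge_two_iff a b h.1 (not_lt.mp hab)).2 hc))
        with h1 | h1
      · exact absurd hp.1 h1
      · exact ⟨by omega, by omega⟩

def process (a : Int) (b : Int) : Int :=
  let p := loopW a b 1
  let moves := if p.1 ≠ 0 then p.2 + 1 else p.2
  PySem.Int.mod moves 3

-- ===== PORT B =====
def recB (a b : Int) : Int :=
  if a = 0 then 0
  else if b = 0 then 1
  else
    let lo := if a ≤ b then a else b
    let hi := if a ≤ b then b else a
    if hk : 0 < lo ∧ 2 * lo ≤ hi then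
      3 * PySem.Int.floordiv hi (2 * lo) +
        (if a ≤ b then recB lo (PySem.Int.mod hi (2 * lo))
         else recB (PySem.Int.mod hi (2 * lo)) lo)
    else 1 + recB b (|a - b|)
termination_by (pvPhase a b, (a + b).toNat)
decreasing_by
  · rename_i ha hb hle
    simp only [lo, hi, dif_pos hle] at hk ⊢
    exact pv_lex_B a b _ hk.1 hk.2 (PySem.Int.mod_nonneg _ (by omega)) (PySem.Int.mod_lt _ (by omega))
  · rename_i ha hb hgt
    simp only [lo, hi, dif_neg hgt] at hk ⊢
    exact pv_lex_A a b _ hk.1 hk.2 (PySem.Int.mod_nonneg _ (by omega)) (PySem.Int.mod_lt _ (by omega))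
  · rename_i ha hb
    refine pv_lex_C a b ha hb (fun hp => ?_)
    by_cases hle : a ≤ b
    · simp only [lo, hi, dif_pos hle] at hk
      rcases not_and_or.mp hk with h1 | h1
      · exact absurd hp.1 h1
      · exact ⟨by omega, by omega⟩
    · simp only [lo, hi, dif_neg hle] at hk
      rcases not_and_or.mp hk with h1 | h1
      · exact absurd hp.2 h1
      · exact ⟨by omega, by omega⟩

def process_alt (a : Int) (b : Int) : Int :=
  PySem.Int.mod (1 + recB a b) 3

-- ===== PRECONDITION & SPEC =====
def Spec_process (a : Int) (b : Int) (out : Int) : Prop := out = process_alt a b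
instance (a : Int) (b : Int) (out : Int) : Decidable (Spec_process a b out) := by unfold Spec_process; infer_instance

-- ===== CLAIM (what is proved, stated in full; the proofs are below) =====
def Claim_equal_process : Prop := ∀ (a : Int) (b : Int), Dom_process a b → Spec_process a b (process a b)

-- ===== LEMMAS AND PROOFS =====
-- A's loop, with the trailing "+1 if a ≠ 0" adjustment applied to its result,
-- computes exactly `moves + recB a b`.
theorem loopW_eq (a b m : Int) :
    (if (loopW a b m).1 ≠ 0 then (loopW a b m).2 + 1 else (loopW a b m).2) = m + recB a b := by
  fun_induction loopW a b m with
  | case1 a b m h inv a1 b1 hk d r hinv ih =>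
    have hinv : a > b := hinv
    simp only [a1, b1, d, r, dif_pos hinv] at ih hk ⊢
    rw [ih]
    have hf := (pv_fdiv_ge_two_iff b a h.2 (le_of_lt hinv)).1 hk
    conv_rhs => rw [recB]
    simp only [if_neg h.1, if_neg h.2, if_neg (show ¬ a ≤ b by omega), dif_pos hf]
    omega
  | case2 a b m h inv a1 b1 hk d r hinv ih =>
    have hle : a ≤ b := not_lt.mp (fun hc => hinv hc)
    have hnb : ¬ a > b := not_lt.mpr hle
    simp only [a1, b1, d, r, dif_neg hnb] at ih hk ⊢
    rw [ih]
    have hf := (pv_fdiv_ge_two_iff a b h.1 hle).1 hk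
    conv_rhs => rw [recB]
    simp only [if_neg h.1, if_neg h.2, if_pos hle, dif_pos hf]
    omega
  | case3 a b m h a1 b1 hk ih =>
    rw [ih]
    conv_rhs => rw [recB]
    by_cases hab : a > b
    · simp only [a1, b1, dif_pos hab] at hk
      have hf : ¬ (0 < b ∧ 2 * b ≤ a) :=
        fun hc => hk ((pv_fdiv_ge_two_iff b a h.2 (le_of_lt hab)).2 hc)
      simp only [if_neg h.1, if_neg h.2, if_neg (show ¬ a ≤ b by omega), dif_neg hf]
      omega
    · have hle : a ≤ b := not_lt.mp hab
      simp only [a1, b1, dif_neg hab] at hk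
      have hf : ¬ (0 < a ∧ 2 * a ≤ b) :=
        fun hc => hk ((pv_fdiv_ge_two_iff a b h.1 hle).2 hc)
      simp only [if_neg h.1, if_neg h.2, if_pos hle, dif_neg hf]
      omega
  | case4 a b m h =>
    by_cases ha : a = 0
    · subst ha
      rw [recB]
      simp
    · have hb : b = 0 := by tauto
      subst hb
      rw [recB]
      simp [ha]

-- ===== VERDICT (by name: the statement is the Claim_ definition above) =====
theorem process_spec : Claim_equal_process := by
  intro a b _
  unfold Spec_process process process_alt
  simpa using congrArg (fun x => PySem.Int.mod x 3) (loopW_eq a b 1)
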